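-- pv_equiv track=rewrite | github.com/yfzzzyyls/dsdSim | src/performance/vidur_provider.py | _expand_sequence
-- ===== SOURCE A (Python) =====
-- from typing import Any, Dict, Optional, Sequence, Tuple, Mapping
--
-- def _expand_sequence(values: Optional[Sequence[int]], size: int, default: int) -> Sequence[int]:
--     if size <= 0:
--         return ()
--     if values:
--         seq = [max(0, int(v)) for v in values]
--         if not seq:
--             seq = [max(0, int(default))]
--     else:
--         seq = [max(0, int(default))]
--     if len(seq) < size:
--         seq.extend([seq[-1]] * (size - len(seq)))
--     return tuple(seq[:size])
-- ===== SOURCE B (Python) =====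
-- from typing import Optional, Sequence
--
-- def _expand_sequence(values: Optional[Sequence[int]], size: int, default: int) -> Sequence[int]:
--     if size <= 0:
--         return ()
--     src = list(values) if values else [default]
--     last = len(src) - 1
--     return tuple(max(0, int(src[min(i, last)])) for i in range(size))
-- ===== Notes on version B (the rewrite author's own statement) =====
-- stated objective: alternative
-- what changed: B builds the output positionally: for each output index i it gathers src[min(i, last)] and clamps on the fly, replacing A's materialise-clamped-list / extend-in-place / slice staging (no padded intermediate list is ever built); A's dead 'if not seq' re-default branch is dropped.
import Mathlib
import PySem

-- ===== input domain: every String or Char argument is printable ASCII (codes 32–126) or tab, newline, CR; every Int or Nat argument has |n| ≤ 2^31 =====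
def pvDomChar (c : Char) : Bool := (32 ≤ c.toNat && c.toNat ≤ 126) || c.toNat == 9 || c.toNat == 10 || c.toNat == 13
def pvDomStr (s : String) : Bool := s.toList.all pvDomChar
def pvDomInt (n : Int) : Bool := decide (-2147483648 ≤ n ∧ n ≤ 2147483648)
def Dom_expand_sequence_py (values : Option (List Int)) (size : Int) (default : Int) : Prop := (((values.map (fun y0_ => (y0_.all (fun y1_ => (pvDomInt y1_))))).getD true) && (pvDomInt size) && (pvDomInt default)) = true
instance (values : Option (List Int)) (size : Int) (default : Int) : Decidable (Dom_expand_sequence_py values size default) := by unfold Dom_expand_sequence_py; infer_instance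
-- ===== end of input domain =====

-- B replaces A's clamp-list / extend-in-place / slice staging by a positional gather:
-- output index i takes max 0 (src[min i last]); objective: alternative (not faster).

-- ===== PORT A =====
-- A: clamp every value, then pad in place if short, then slice.  tuple return ported as List Int.
def expand_sequence_py (values : Option (List Int)) (size : Int) (default : Int) : List Int :=
  if size ≤ 0 then []
  else
    let seq :=
      match values with
      | some vs =>
          if vs ≠ [] then
            let seq := vs.map (fun v => max 0 v)
            if seq = [] then [max 0 default] else seq   -- A's dead 'if not seq' branch, kept literally
          else [max 0 default]
      | none => [max 0 default]
    let seq := if seq.length < size.toNat then seq ++ List.replicate (size.toNat - seq.length) seq.getLast! else seq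
    seq.take size.toNat   -- seq[:size] with size > 0: exact

-- ===== PORT B =====
-- B: src is the raw values (or [default]); output position i is max 0 (src[min i (len-1)]).
-- src[min i last] is always in range, ported with getD 0 (never hit).
def expand_sequence_py_alt (values : Option (List Int)) (size : Int) (default : Int) : List Int :=
  if size ≤ 0 then []
  else
    let src :=
      match values with
      | some vs => if vs ≠ [] then vs else [default]
      | none => [default]
    (List.range size.toNat).map (fun i => max 0 (src.getD (min i (src.length - 1)) 0))

-- ===== PRECONDITION & SPEC =====
def Spec_expand_sequence_py (values : Option (List Int)) (size : Int) (default : Int) (out : List Int) : Prop := out = expand_sequence_py_alt values size default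
instance (values : Option (List Int)) (size : Int) (default : Int) (out : List Int) : Decidable (Spec_expand_sequence_py values size default out) := by unfold Spec_expand_sequence_py; infer_instance

-- ===== CLAIM (what is proved, stated in full; the proofs are below) =====
def Claim_equal_expand_sequence_py : Prop := ∀ (values : Option (List Int)) (size : Int) (default : Int), Dom_expand_sequence_py values size default → Spec_expand_sequence_py values size default (expand_sequence_py values size default)

-- ===== LEMMAS AND PROOFS =====

-- getLast! of a nonempty list is its getLast.
lemma getLast!_eq_getLast (l : List Int) (h : l ≠ []) : l.getLast! = l.getLast h := by
  cases l with
  | nil => exact absurd rfl h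
  | cons a t => simp [List.getLast!]

-- A's pad-then-slice on a nonempty list equals B's positional gather of the same list.
lemma pad_take_eq_gather (l : List Int) (hl : l ≠ []) (n : Nat) :
    (if l.length < n then l ++ List.replicate (n - l.length) l.getLast! else l).take n
      = (List.range n).map (fun i => l.getD (min i (l.length - 1)) 0) := by
  have hlen : 0 < l.length := List.length_pos_iff.mpr hl
  apply List.ext_getElem
  · split_ifs with h <;> simp <;> omega
  · intro i hi hi2
    simp only [List.getElem_map, List.getElem_range] at *
    have hin : i < n := by simpa using hi2
    by_cases hil : i < l.length
    · have hmin : min i (l.length - 1) = i := by omega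
      rw [hmin, List.getD_eq_getElem _ _ hil]
      split_ifs with h
      · rw [List.getElem_take, List.getElem_append_left hil]
      · rw [List.getElem_take]
    · have h : l.length < n := by omega
      have hmin : min i (l.length - 1) = l.length - 1 := by omega
      rw [hmin, List.getD_eq_getElem _ _ (by omega)]
      simp only [h, if_true]
      rw [List.getElem_take, List.getElem_append_right (by omega), List.getElem_replicate]
      rw [getLast!_eq_getLast l hl, List.getLast_eq_getElem]

-- B's on-the-fly clamp of the raw list equals gathering from the pre-clamped list.
lemma clamp_getD (l : List Int) (k : Nat) :
    max 0 (l.getD k 0) = (l.map (fun v => max 0 v)).getD k 0 := by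
  by_cases h : k < l.length
  · rw [List.getD_eq_getElem _ _ h, List.getD_eq_getElem _ _ (by simpa using h)]
    simp
  · rw [List.getD_eq_default _ _ (by omega), List.getD_eq_default _ _ (by simpa using (by omega : l.length ≤ k))]
    simp

-- ===== VERDICT (by name: the statement is the Claim_ definition above) =====
theorem expand_sequence_py_spec : Claim_equal_expand_sequence_py := by
  intro values size default _
  unfold Spec_expand_sequence_py expand_sequence_py expand_sequence_py_alt
  split_ifs with hs
  · rfl
  · simp only []
    have key : ∀ (src : List Int), src ≠ [] →
        (let seq := src.map (fun v => max 0 v);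
         (if seq.length < size.toNat then seq ++ List.replicate (size.toNat - seq.length) seq.getLast! else seq).take size.toNat)
          = (List.range size.toNat).map (fun i => max 0 (src.getD (min i (src.length - 1)) 0)) := by
      intro src hsrc
      have hb : src.map (fun v => max 0 v) ≠ [] := by simpa using hsrc
      rw [pad_take_eq_gather _ hb]
      apply List.map_congr_left
      intro i _
      rw [clamp_getD]
      simp
    match values with
    | none => exact key [default] (by simp)
    | some vs =>
      by_cases hvs : vs = []
      · simp only [hvs, ne_eq, not_true_eq_false, if_false]
        exact key [default] (by simp)
      · simp only [hvs, ne_eq, not_false_iff, if_true, List.map_eq_nil_iff]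
        exact key vs hvs
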